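-- pv_equiv track=rewrite | github.com/AmitNimrodi/Privacy-pre | dec_tree.py | vals_string
-- ===== SOURCE A (Python) =====
-- def vals_string(vals):
--     if len(vals)==0:
--         return ""
--     else:
--         new_vals=[]
--         if "U30" in vals:
--             new_vals.append("U30")
--         elif "30-40" in vals:
--             new_vals.append("30-40")
--         elif "40+" in vals:
--             new_vals.append("40+")
--         if "low" in vals:
--             new_vals.append("low")
--         elif "avg" in vals:
--             new_vals.append("avg")
--         elif "high" in vals:
--             new_vals.append("high")
--         if "U5" in vals:
--             new_vals.append("U5")
--         elif "5-9" in vals: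
--             new_vals.append("5-9")
--         elif "10+" in vals:
--             new_vals.append("10+")
--         if "not-rel" in vals:
--             new_vals.append("not-rel")
--         elif "rel" in vals:
--             new_vals.append("rel")
--         if "none" in vals:
--             new_vals.append("none")
--         elif "long" in vals:
--             new_vals.append("long")
--         elif "short" in vals:
--             new_vals.append("short")
--         string=new_vals[0]
--         for x in new_vals:
--             if string!=x:
--                 string=string+"_"+x
--         return string
-- ===== SOURCE B (Python) =====
-- # One pass over vals with a rank dictionary: each known value maps to (group, position);
-- # keep the minimal-position value per group, then emit groups in ascending order.
-- RANK = {
--     "U30": (0, 0), "30-40": (0, 1), "40+": (0, 2),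
--     "low": (1, 0), "avg": (1, 1), "high": (1, 2),
--     "U5": (2, 0), "5-9": (2, 1), "10+": (2, 2),
--     "not-rel": (3, 0), "rel": (3, 1),
--     "none": (4, 0), "long": (4, 1), "short": (4, 2),
-- }
--
-- def vals_string(vals):
--     if len(vals) == 0:
--         return ""
--     best = {}
--     for v in vals:
--         r = RANK.get(v)
--         if r is None:
--             continue
--         g, p = r
--         if g not in best or p < best[g][0]:
--             best[g] = (p, v)
--     return "_".join(best[g][1] for g in sorted(best))
-- ===== Notes on version B (the rewrite author's own statement) =====
-- stated objective: alternative
-- what changed: Instead of testing membership of each hardcoded category value in vals and then seed-and-compare concatenating, B makes a single pass over vals with a rank dictionary mapping each known value to (group, position), keeps the minimal-position value per group, and joins the per-group winners in sorted group order.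
import Mathlib
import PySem

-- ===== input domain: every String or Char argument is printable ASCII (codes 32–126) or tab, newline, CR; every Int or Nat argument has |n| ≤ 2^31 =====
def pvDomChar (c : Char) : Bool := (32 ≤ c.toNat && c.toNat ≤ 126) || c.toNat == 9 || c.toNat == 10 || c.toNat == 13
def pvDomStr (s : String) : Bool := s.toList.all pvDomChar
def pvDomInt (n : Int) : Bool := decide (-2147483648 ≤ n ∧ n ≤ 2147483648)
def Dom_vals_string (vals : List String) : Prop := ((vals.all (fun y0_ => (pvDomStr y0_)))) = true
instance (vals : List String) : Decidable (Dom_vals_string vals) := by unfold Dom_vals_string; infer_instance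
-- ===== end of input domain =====

-- B replaces A's hardcoded per-category membership branches and seed-and-compare concatenation
-- loop with a single pass over vals keeping the best (minimal-position) value per group in a
-- rank dictionary, then joining the per-group winners in sorted group order (objective: alternative).


-- ===== PORT A =====
-- literal transliteration of A: the if/elif append chain, then the seed-and-compare loop.
-- Python's new_vals[0] raises IndexError when new_vals is empty; Pre_ excludes exactly that
-- case, so headD's default is never reached on admitted inputs.
def vals_string (vals : List String) : String :=
  if vals.length == 0 then ""
  else
    let new_vals : List String := []
    let new_vals :=
      if vals.contains "U30" then new_vals ++ ["U30"]
      else if vals.contains "30-40" then new_vals ++ ["30-40"]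
      else if vals.contains "40+" then new_vals ++ ["40+"]
      else new_vals
    let new_vals :=
      if vals.contains "low" then new_vals ++ ["low"]
      else if vals.contains "avg" then new_vals ++ ["avg"]
      else if vals.contains "high" then new_vals ++ ["high"]
      else new_vals
    let new_vals :=
      if vals.contains "U5" then new_vals ++ ["U5"]
      else if vals.contains "5-9" then new_vals ++ ["5-9"]
      else if vals.contains "10+" then new_vals ++ ["10+"]
      else new_vals
    let new_vals :=
      if vals.contains "not-rel" then new_vals ++ ["not-rel"]
      else if vals.contains "rel" then new_vals ++ ["rel"]
      else new_vals
    let new_vals :=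
      if vals.contains "none" then new_vals ++ ["none"]
      else if vals.contains "long" then new_vals ++ ["long"]
      else if vals.contains "short" then new_vals ++ ["short"]
      else new_vals
    let string := new_vals.headD ""
    new_vals.foldl (fun string x => if string != x then string ++ "_" ++ x else string) string

-- ===== PORT B =====
-- the literal rank dictionary RANK of Source B: value -> (group, position)
def pvRank : PySem.Dict String (Int × Int) := PySem.Dict.mk
  [("U30", (0, 0)), ("30-40", (0, 1)), ("40+", (0, 2)),
   ("low", (1, 0)), ("avg", (1, 1)), ("high", (1, 2)),
   ("U5", (2, 0)), ("5-9", (2, 1)), ("10+", (2, 2)),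
   ("not-rel", (3, 0)), ("rel", (3, 1)),
   ("none", (4, 0)), ("long", (4, 1)), ("short", (4, 2))]

-- the body of Source B's single loop over vals: keep the minimal-position (p, v) per group g
def pvStepB (best : PySem.Dict Int (Int × String)) (v : String) : PySem.Dict Int (Int × String) :=
  match PySem.Dict.get? pvRank v with
  | none => best
  | some (g, p) =>
    match PySem.Dict.get? best g with
    | none => best.insert g (p, v)
    | some (p0, _) => if p < p0 then best.insert g (p, v) else best

def vals_string_alt (vals : List String) : String :=
  if vals.length == 0 then ""
  else
    let best := vals.foldl pvStepB PySem.Dict.empty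
    let gs := PySem.List.sorted best.keys (fun k => k) false
    -- Python's best[g] cannot miss (g ∈ sorted(best)); getD's default is never reached
    PySem.Str.join "_" (gs.map (fun g => (best.getD g ((0 : Int), "")).2))

-- ===== PRECONDITION & SPEC =====
-- Pre_ excludes exactly the inputs on which Python A raises IndexError at new_vals[0]:
-- a non-empty vals containing none of the 14 category values.
def Pre_vals_string (vals : List String) : Prop :=
  vals = [] ∨ ∃ c ∈ ["U30","30-40","40+","low","avg","high","U5","5-9","10+","not-rel","rel","none","long","short"], vals.contains c = true
instance (vals : List String) : Decidable (Pre_vals_string vals) := by unfold Pre_vals_string; infer_instance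

def pvWitness_vals_string : List String := ["low", "U30"]

def Spec_vals_string (vals : List String) (out : String) : Prop := out = vals_string_alt vals
instance (vals : List String) (out : String) : Decidable (Spec_vals_string vals out) := by unfold Spec_vals_string; infer_instance

-- ===== CLAIM (what is proved, stated in full; the proofs are below) =====
def Claim_equal_vals_string : Prop := ∀ (vals : List String), Dom_vals_string vals → Pre_vals_string vals → Spec_vals_string vals (vals_string vals)

-- ===== LEMMAS AND PROOFS =====
def pvG (k : Int) : List String :=
  if k = 0 then ["U30","30-40","40+"]
  else if k = 1 then ["low","avg","high"]
  else if k = 2 then ["U5","5-9","10+"]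
  else if k = 3 then ["not-rel","rel"]
  else if k = 4 then ["none","long","short"]
  else []

def pvPickAux (g : List String) (i : Int) (u : List String) : Option (Int × String) :=
  match g with
  | [] => none
  | w :: t => if u.contains w then some (i, w) else pvPickAux t (i+1) u

def pvPick (k : Int) (u : List String) : Option (Int × String) := pvPickAux (pvG k) 0 u


theorem pickAux_ge (g : List String) (i : Int) (u : List String) (p : Int) (w : String)
    (h : pvPickAux g i u = some (p, w)) : i ≤ p := by
  induction g generalizing i with
  | nil => simp [pvPickAux] at h
  | cons a t ih =>
    unfold pvPickAux at h
    by_cases hc : u.contains a = true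
    · rw [if_pos hc] at h
      simp at h
      omega
    · rw [if_neg hc] at h
      have := ih (i+1) h
      omega

theorem pickAux_app_not_mem (g : List String) (u : List String) (v : String)
    (hv : v ∉ g) : ∀ (i : Int), pvPickAux g i (u ++ [v]) = pvPickAux g i u := by
  induction g with
  | nil => intro i; rfl
  | cons a t ih =>
    intro i
    have hne : a ≠ v := fun h => hv (h ▸ List.mem_cons_self ..)
    have hcc : (u ++ [v]).contains a = u.contains a := by
      simp [List.contains_eq_mem, List.mem_append, hne]
    unfold pvPickAux
    rw [hcc]
    by_cases hc : u.contains a = true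
    · rw [if_pos hc, if_pos hc]
    · rw [if_neg hc, if_neg hc, ih (fun hm => hv (List.mem_cons_of_mem _ hm)) (i+1)]

theorem pickAux_app_mem (l1 : List String) (v : String) (l2 : List String)
    (u : List String) (hv : v ∉ l1) : ∀ (i : Int),
    pvPickAux (l1 ++ v :: l2) i (u ++ [v]) =
      match pvPickAux (l1 ++ v :: l2) i u with
      | none => some (i + l1.length, v)
      | some (p0, w0) => if i + l1.length < p0 then some (i + l1.length, v) else some (p0, w0) := by
  induction l1 with
  | nil =>
    intro i
    simp only [List.nil_append, List.length_nil, Nat.cast_zero, add_zero]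
    have hcv : (u ++ [v]).contains v = true := by
      simp [List.contains_eq_mem, List.mem_append]
    unfold pvPickAux
    rw [hcv, if_pos rfl]
    by_cases hc : u.contains v = true
    · rw [if_pos hc]
      simp
    · rw [if_neg hc]
      cases hrec : pvPickAux l2 (i+1) u with
      | none => rfl
      | some pw =>
        obtain ⟨p0, w0⟩ := pw
        have := pickAux_ge l2 (i+1) u p0 w0 hrec
        rw [show (match some (p0, w0) with
          | none => some (i, v)
          | some (p0, w0) => if i < p0 then some (i, v) else some (p0, w0)) = if i < p0 then some (i, v) else some (p0, w0) from rfl]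
        rw [if_pos (by omega)]
  | cons a t ih =>
    intro i
    have hne : a ≠ v := fun h => hv (h ▸ List.mem_cons_self ..)
    have hcc : (u ++ [v]).contains a = u.contains a := by
      simp [List.contains_eq_mem, List.mem_append, hne]
    simp only [List.cons_append, List.length_cons]
    unfold pvPickAux
    rw [hcc]
    by_cases hc : u.contains a = true
    · rw [if_pos hc, if_pos hc]
      have hno : ¬ (i + ((t.length : Int) + 1) < i) := by omega
      push_cast
      simp [hno]
    · rw [if_neg hc, if_neg hc, ih (fun hm => hv (List.mem_cons_of_mem _ hm)) (i+1)]
      have h1 : i + 1 + (t.length : Int) = i + ((t.length : Int) + 1) := by ring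
      cases pvPickAux (t ++ v :: l2) (i+1) u with
      | none => simp [h1]
      | some pw =>
        obtain ⟨p0, w0⟩ := pw
        rw [h1]; norm_cast

theorem pvPick_app_not_mem (k : Int) (u : List String) (v : String) (hv : v ∉ pvG k) :
    pvPick k (u ++ [v]) = pvPick k u := by
  unfold pvPick
  exact pickAux_app_not_mem _ u v hv 0

theorem pvStepCase (v : String) (g p : Int) (l1 l2 : List String)
    (hg : pvG g = l1 ++ v :: l2) (hp : p = l1.length) (hv1 : v ∉ l1)
    (hr : PySem.Dict.get? pvRank v = some (g, p))
    (hdisj : ∀ k, k ≠ g → v ∉ pvG k)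
    (u : List String) (best : PySem.Dict Int (Int × String))
    (h : ∀ k, best.get? k = pvPick k u) :
    ∀ k, (pvStepB best v).get? k = pvPick k (u ++ [v]) := by
  intro k
  unfold pvStepB
  rw [hr]
  show (match best.get? g with
    | none => best.insert g (p, v)
    | some (p0, _) => if p < p0 then best.insert g (p, v) else best).get? k = pvPick k (u ++ [v])
  rw [h g]
  by_cases hk : k = g
  · subst hk
    unfold pvPick
    rw [hg, pickAux_app_mem l1 v l2 u hv1 0]
    cases hcase : pvPickAux (l1 ++ v :: l2) 0 u with
    | none =>
      show (best.insert k (p, v)).get? k = some (0 + (l1.length : Int), v)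
      rw [PySem.Dict.get?_insert, if_pos rfl, hp]
      norm_num
    | some pw =>
      obtain ⟨p0, w0⟩ := pw
      show (if p < p0 then best.insert k (p, v) else best).get? k =
        if 0 + (l1.length : Int) < p0 then some (0 + (l1.length : Int), v) else some (p0, w0)
      by_cases hlt : p < p0
      · rw [if_pos hlt, if_pos (by omega), PySem.Dict.get?_insert, if_pos rfl, hp]
        norm_num
      · rw [if_neg hlt, if_neg (by omega), h k, pvPick, hg, hcase]
  · rw [pvPick_app_not_mem k u v (hdisj k hk), ← h k]
    cases pvPick g u with
    | none =>
      show (best.insert g (p, v)).get? k = best.get? k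
      rw [PySem.Dict.get?_insert, if_neg hk]
    | some pw =>
      obtain ⟨p0, w0⟩ := pw
      show (if p < p0 then best.insert g (p, v) else best).get? k = best.get? k
      by_cases hlt : p < p0
      · rw [if_pos hlt, PySem.Dict.get?_insert, if_neg hk]
      · rw [if_neg hlt]

theorem pvStepNone (v : String) (hr : PySem.Dict.get? pvRank v = none)
    (u : List String) (best : PySem.Dict Int (Int × String))
    (h : ∀ k, best.get? k = pvPick k u)
    (hall : ∀ k, v ∉ pvG k) :
    ∀ k, (pvStepB best v).get? k = pvPick k (u ++ [v]) := by
  intro k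
  unfold pvStepB
  rw [hr, h k, pvPick_app_not_mem k u v (hall k)]

theorem pvStepAll (u : List String) (v : String)
    (best : PySem.Dict Int (Int × String)) (h : ∀ k, best.get? k = pvPick k u) :
    ∀ k, (pvStepB best v).get? k = pvPick k (u ++ [v]) := by
  by_cases h1 : v = "U30"
  · subst h1; exact pvStepCase _ 0 0 [] ["30-40","40+"] rfl (by norm_num) (by decide) rfl
      (by intro k hk hm; unfold pvG at hm; split_ifs at hm <;> simp_all) u best h
  by_cases h2 : v = "30-40"
  · subst h2; exact pvStepCase _ 0 1 ["U30"] ["40+"] rfl (by norm_num) (by decide) rfl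
      (by intro k hk hm; unfold pvG at hm; split_ifs at hm <;> simp_all) u best h
  by_cases h3 : v = "40+"
  · subst h3; exact pvStepCase _ 0 2 ["U30","30-40"] [] rfl (by norm_num) (by decide) rfl
      (by intro k hk hm; unfold pvG at hm; split_ifs at hm <;> simp_all) u best h
  by_cases h4 : v = "low"
  · subst h4; exact pvStepCase _ 1 0 [] ["avg","high"] rfl (by norm_num) (by decide) rfl
      (by intro k hk hm; unfold pvG at hm; split_ifs at hm <;> simp_all) u best h
  by_cases h5 : v = "avg"
  · subst h5; exact pvStepCase _ 1 1 ["low"] ["high"] rfl (by norm_num) (by decide) rfl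
      (by intro k hk hm; unfold pvG at hm; split_ifs at hm <;> simp_all) u best h
  by_cases h6 : v = "high"
  · subst h6; exact pvStepCase _ 1 2 ["low","avg"] [] rfl (by norm_num) (by decide) rfl
      (by intro k hk hm; unfold pvG at hm; split_ifs at hm <;> simp_all) u best h
  by_cases h7 : v = "U5"
  · subst h7; exact pvStepCase _ 2 0 [] ["5-9","10+"] rfl (by norm_num) (by decide) rfl
      (by intro k hk hm; unfold pvG at hm; split_ifs at hm <;> simp_all) u best h
  by_cases h8 : v = "5-9"
  · subst h8; exact pvStepCase _ 2 1 ["U5"] ["10+"] rfl (by norm_num) (by decide) rfl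
      (by intro k hk hm; unfold pvG at hm; split_ifs at hm <;> simp_all) u best h
  by_cases h9 : v = "10+"
  · subst h9; exact pvStepCase _ 2 2 ["U5","5-9"] [] rfl (by norm_num) (by decide) rfl
      (by intro k hk hm; unfold pvG at hm; split_ifs at hm <;> simp_all) u best h
  by_cases h10 : v = "not-rel"
  · subst h10; exact pvStepCase _ 3 0 [] ["rel"] rfl (by norm_num) (by decide) rfl
      (by intro k hk hm; unfold pvG at hm; split_ifs at hm <;> simp_all) u best h
  by_cases h11 : v = "rel"
  · subst h11; exact pvStepCase _ 3 1 ["not-rel"] [] rfl (by norm_num) (by decide) rfl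
      (by intro k hk hm; unfold pvG at hm; split_ifs at hm <;> simp_all) u best h
  by_cases h12 : v = "none"
  · subst h12; exact pvStepCase _ 4 0 [] ["long","short"] rfl (by norm_num) (by decide) rfl
      (by intro k hk hm; unfold pvG at hm; split_ifs at hm <;> simp_all) u best h
  by_cases h13 : v = "long"
  · subst h13; exact pvStepCase _ 4 1 ["none"] ["short"] rfl (by norm_num) (by decide) rfl
      (by intro k hk hm; unfold pvG at hm; split_ifs at hm <;> simp_all) u best h
  by_cases h14 : v = "short"
  · subst h14; exact pvStepCase _ 4 2 ["none","long"] [] rfl (by norm_num) (by decide) rfl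
      (by intro k hk hm; unfold pvG at hm; split_ifs at hm <;> simp_all) u best h
  · refine pvStepNone v ?_ u best h ?_
    · unfold pvRank
      simp only [PySem.Dict.get?_mk_cons]
      rw [if_neg (by simp [Ne.symm h1]), if_neg (by simp [Ne.symm h2]), if_neg (by simp [Ne.symm h3]),
          if_neg (by simp [Ne.symm h4]), if_neg (by simp [Ne.symm h5]), if_neg (by simp [Ne.symm h6]),
          if_neg (by simp [Ne.symm h7]), if_neg (by simp [Ne.symm h8]), if_neg (by simp [Ne.symm h9]),
          if_neg (by simp [Ne.symm h10]), if_neg (by simp [Ne.symm h11]), if_neg (by simp [Ne.symm h12]),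
          if_neg (by simp [Ne.symm h13]), if_neg (by simp [Ne.symm h14])]
      rfl
    · intro k hm
      unfold pvG at hm
      split_ifs at hm <;> simp_all

theorem pvPick_nil (k : Int) : pvPick k [] = none := by
  unfold pvPick pvG
  split_ifs <;> simp [pvPickAux]

theorem pvFoldInv (l : List String) : ∀ (u : List String) (best : PySem.Dict Int (Int × String)),
    (∀ k, best.get? k = pvPick k u) →
    ∀ k, (l.foldl pvStepB best).get? k = pvPick k (u ++ l) := by
  induction l with
  | nil => intro u best h k; simpa using h k
  | cons v t ih =>
    intro u best h k
    have := ih (u ++ [v]) (pvStepB best v) (pvStepAll u v best h) k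
    simpa [List.append_assoc] using this

theorem pvStepB_nodup (best : PySem.Dict Int (Int × String)) (v : String)
    (h : best.keys.Nodup) : (pvStepB best v).keys.Nodup := by
  cases hq : pvRank.get? v with
  | none => simp only [pvStepB, hq]; exact h
  | some gp =>
    obtain ⟨g, p⟩ := gp
    cases hb : best.get? g with
    | none =>
      simp only [pvStepB, hq, hb]
      exact PySem.Dict.nodup_keys_insert _ _ _ h
    | some pw =>
      obtain ⟨p0, w0⟩ := pw
      simp only [pvStepB, hq, hb]
      by_cases hlt : p < p0
      · rw [if_pos hlt]; exact PySem.Dict.nodup_keys_insert _ _ _ h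
      · rw [if_neg hlt]; exact h

theorem pvFold_nodup (l : List String) : ∀ (best : PySem.Dict Int (Int × String)),
    best.keys.Nodup → (l.foldl pvStepB best).keys.Nodup := by
  induction l with
  | nil => intro best h; exact h
  | cons v t ih => intro best h; exact ih _ (pvStepB_nodup best v h)

def pvKeyList (vals : List String) : List Int :=
  (if (pvPick 0 vals).isSome then [(0:Int)] else []) ++
  (if (pvPick 1 vals).isSome then [(1:Int)] else []) ++
  (if (pvPick 2 vals).isSome then [(2:Int)] else []) ++
  (if (pvPick 3 vals).isSome then [(3:Int)] else []) ++
  (if (pvPick 4 vals).isSome then [(4:Int)] else [])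

theorem pvPick_out (k : Int) (vals : List String)
    (h0 : k ≠ 0) (h1 : k ≠ 1) (h2 : k ≠ 2) (h3 : k ≠ 3) (h4 : k ≠ 4) :
    pvPick k vals = none := by
  unfold pvPick pvG
  split_ifs <;> simp_all [pvPickAux]

theorem pvKeyList_pairwise (vals : List String) : (pvKeyList vals).Pairwise (· < ·) := by
  unfold pvKeyList
  split_ifs <;> decide

theorem pvKeyList_mem (vals : List String) (a : Int) :
    a ∈ pvKeyList vals ↔ (pvPick a vals).isSome := by
  unfold pvKeyList
  by_cases a0 : a = 0
  · subst a0; split_ifs <;> simp_all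
  by_cases a1 : a = 1
  · subst a1; split_ifs <;> simp_all
  by_cases a2 : a = 2
  · subst a2; split_ifs <;> simp_all
  by_cases a3 : a = 3
  · subst a3; split_ifs <;> simp_all
  by_cases a4 : a = 4
  · subst a4; split_ifs <;> simp_all
  · rw [pvPick_out a vals a0 a1 a2 a3 a4]
    split_ifs <;> simp_all

theorem pvKeyList_nodup (vals : List String) : (pvKeyList vals).Nodup := by
  unfold pvKeyList
  split_ifs <;> decide

theorem pvSortedKeys (vals : List String) (best : PySem.Dict Int (Int × String))
    (hnd : best.keys.Nodup) (h : ∀ k, best.get? k = pvPick k vals) :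
    PySem.List.sorted best.keys (fun k => k) false = pvKeyList vals := by
  apply PySem.List.sorted_eq_of_perm_of_pairwise_lt
  · rw [List.perm_ext_iff_of_nodup (pvKeyList_nodup vals) hnd]
    intro a
    rw [pvKeyList_mem, ← h a, ← Option.ne_none_iff_isSome, Ne, PySem.Dict.get?_eq_none_iff_not_mem_keys]
    exact not_not
  · exact pvKeyList_pairwise vals

def pvPk (g : List String) (vals : List String) : List String :=
  match g.find? (fun v => vals.contains v) with
  | some v => [v]
  | none => []

theorem pvMapPiece (best : PySem.Dict Int (Int × String)) (vals : List String)
    (h : ∀ k, best.get? k = pvPick k vals) (k : Int) :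
    (if (pvPick k vals).isSome then [k] else []).map (fun g => (best.getD g ((0:Int), "")).2)
      = (match pvPick k vals with | none => [] | some (_, w) => [w]) := by
  cases hp : pvPick k vals with
  | none => simp
  | some pw =>
    obtain ⟨p, w⟩ := pw
    simp [PySem.Dict.getD_eq_get?_getD, h k, hp]

theorem pvPickPk (vals : List String) (k : Int) (hk : k = 0 ∨ k = 1 ∨ k = 2 ∨ k = 3 ∨ k = 4) :
    (match pvPick k vals with | none => [] | some (_, w) => [w]) = pvPk (pvG k) vals := by
  rcases hk with rfl | rfl | rfl | rfl | rfl <;>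
  · show (match pvPickAux (pvG _) 0 vals with | none => [] | some (_, w) => [w]) = pvPk (pvG _) vals
    simp only [pvG, pvPk]
    norm_num
    simp only [pvPickAux]
    split_ifs <;> simp_all [List.find?]

-- ===== A-side machinery: the if/elif chain appends the first match per group, and the
-- seed-and-compare loop is '_'-join on a nodup underscore-free list =====

-- "_" ++ x₁ ++ "_" ++ x₂ ++ …
def pvUnd : List String → String
  | [] => ""
  | x :: t => "_" ++ x ++ pvUnd t

-- the body of A's seed-and-compare loop
def pvStep (s x : String) : String := if s != x then s ++ "_" ++ x else s

theorem pvChain1 (vals nv : List String) (a : String) :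
    (if vals.contains a then nv ++ [a] else nv) = nv ++ pvPk [a] vals := by
  unfold pvPk
  simp only [List.find?_cons, List.find?_nil]
  cases vals.contains a <;> simp

theorem pvChainCons (vals nv : List String) (a : String) (g : List String) :
    (if vals.contains a then nv ++ [a] else nv ++ pvPk g vals) = nv ++ pvPk (a :: g) vals := by
  unfold pvPk
  simp only [List.find?_cons]
  cases vals.contains a <;> simp

theorem pvPk_sub (g vals : List String) : ∀ x ∈ pvPk g vals, x ∈ g := by
  unfold pvPk
  cases h : g.find? (fun v => vals.contains v) with
  | none => simp
  | some v => simpa using List.mem_of_find?_eq_some h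

theorem pvPk_nodup (g vals : List String) : (pvPk g vals).Nodup := by
  unfold pvPk
  cases g.find? (fun v => vals.contains v) <;> simp

theorem pvL1 (t : List String) (s : String) (hs : '_' ∈ s.toList)
    (ht : ∀ x ∈ t, '_' ∉ x.toList) :
    t.foldl pvStep s = s ++ pvUnd t := by
  induction t generalizing s with
  | nil => simp [pvUnd]
  | cons x t ih =>
    have hx : '_' ∉ x.toList := ht x (List.mem_cons_self ..)
    have hne : s ≠ x := fun h => hx (h ▸ hs)
    have hstep : pvStep s x = s ++ "_" ++ x := by simp [pvStep, bne_iff_ne, hne]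
    have hs' : '_' ∈ (s ++ "_" ++ x).toList := by
      simp [String.toList_append]
    calc (x :: t).foldl pvStep s
        = t.foldl pvStep (s ++ "_" ++ x) := by simp [List.foldl, hstep]
      _ = s ++ "_" ++ x ++ pvUnd t := ih _ hs' (fun y hy => ht y (List.mem_cons_of_mem _ hy))
      _ = s ++ pvUnd (x :: t) := by
          apply String.toList_injective
          simp [pvUnd, String.toList_append]

theorem pvJ (a : String) (t : List String) :
    PySem.Str.join "_" (a :: t) = a ++ pvUnd t := by
  induction t generalizing a with
  | nil =>
    apply String.toList_injective
    simp [pvUnd, PySem.Str.toList_join, PySem.Chars.join_singleton]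
  | cons x t ih =>
    apply String.toList_injective
    have := congrArg String.toList (ih x)
    simp only [PySem.Str.toList_join, List.map, String.toList_append] at this ⊢
    rw [show ("_" : String).toList = ['_'] from rfl] at this ⊢
    rw [PySem.Chars.join_cons_cons]
    simp [pvUnd, this, String.toList_append]

theorem pvNodup5 (p1 p2 p3 p4 p5 : List String)
    (n1 : p1.Nodup) (n2 : p2.Nodup) (n3 : p3.Nodup) (n4 : p4.Nodup) (n5 : p5.Nodup)
    (d12 : p1.Disjoint p2) (d13 : p1.Disjoint p3) (d14 : p1.Disjoint p4) (d15 : p1.Disjoint p5)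
    (d23 : p2.Disjoint p3) (d24 : p2.Disjoint p4) (d25 : p2.Disjoint p5)
    (d34 : p3.Disjoint p4) (d35 : p3.Disjoint p5) (d45 : p4.Disjoint p5) :
    (p1 ++ p2 ++ p3 ++ p4 ++ p5).Nodup := by
  have dmem : ∀ {p q : List String}, p.Disjoint q → ∀ a ∈ p, ∀ b ∈ q, a ≠ b :=
    fun hd a ha b hb he => hd ha (he ▸ hb)
  simp only [List.append_assoc, List.nodup_append]
  refine ⟨n1, ⟨n2, ⟨n3, ⟨n4, n5, dmem d45⟩, ?_⟩, ?_⟩, ?_⟩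
  · intro a ha b hb
    rcases List.mem_append.mp hb with hb | hb
    · exact dmem d34 a ha b hb
    · exact dmem d35 a ha b hb
  · intro a ha b hb
    rcases List.mem_append.mp hb with hb | hb'
    · exact dmem d23 a ha b hb
    · rcases List.mem_append.mp hb' with hb | hb
      · exact dmem d24 a ha b hb
      · exact dmem d25 a ha b hb
  · intro a ha b hb
    rcases List.mem_append.mp hb with hb | hb'
    · exact dmem d12 a ha b hb
    · rcases List.mem_append.mp hb' with hb | hb''
      · exact dmem d13 a ha b hb
      · rcases List.mem_append.mp hb'' with hb | hb
        · exact dmem d14 a ha b hb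
        · exact dmem d15 a ha b hb

theorem pvL0 (l : List String) (hl : ∀ x ∈ l, '_' ∉ x.toList) (hnd : l.Nodup) :
    l.foldl pvStep (l.headD "") = PySem.Str.join "_" l := by
  cases l with
  | nil => rfl
  | cons a t =>
    have hstep0 : pvStep a a = a := by simp [pvStep]
    cases t with
    | nil =>
      rw [pvJ]
      apply String.toList_injective
      simp [List.foldl, hstep0, pvUnd]
    | cons x t' =>
      have hax : a ≠ x := by
        intro h
        exact (List.nodup_cons.mp hnd).1 (h ▸ List.mem_cons_self ..)
      have hstep1 : pvStep a x = a ++ "_" ++ x := by simp [pvStep, bne_iff_ne, hax]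
      have hs' : '_' ∈ (a ++ "_" ++ x).toList := by simp [String.toList_append]
      rw [pvJ]
      calc (a :: x :: t').foldl pvStep ((a :: x :: t').headD "")
          = t'.foldl pvStep (a ++ "_" ++ x) := by simp [List.foldl, hstep0, hstep1]
        _ = a ++ "_" ++ x ++ pvUnd t' := pvL1 t' _ hs'
              (fun y hy => hl y (List.mem_cons_of_mem _ (List.mem_cons_of_mem _ hy)))
        _ = a ++ pvUnd (x :: t') := by
            apply String.toList_injective
            simp [pvUnd, String.toList_append]

-- all category values are underscore-free
theorem pvCats_noUnd : ∀ x ∈ (["U30","30-40","40+","low","avg","high","U5","5-9","10+","not-rel","rel","none","long","short"] : List String), '_' ∉ x.toList := by decide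

-- ===== the two sides both equal '_'-join of the five per-group picks =====

theorem pvAeq (vals : List String) (h0 : ¬ (vals.length == 0) = true) :
    vals_string vals = PySem.Str.join "_"
      (pvPk ["U30","30-40","40+"] vals ++ pvPk ["low","avg","high"] vals ++
       pvPk ["U5","5-9","10+"] vals ++ pvPk ["not-rel","rel"] vals ++ pvPk ["none","long","short"] vals) := by
  simp only [vals_string, pvChain1, pvChainCons]
  simp only [h0, Bool.false_eq_true, if_false, List.nil_append]
  rw [show (fun (string x : String) => if string != x then string ++ "_" ++ x else string) = pvStep from rfl]
  set p1 := pvPk ["U30","30-40","40+"] vals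
  set p2 := pvPk ["low","avg","high"] vals
  set p3 := pvPk ["U5","5-9","10+"] vals
  set p4 := pvPk ["not-rel","rel"] vals
  set p5 := pvPk ["none","long","short"] vals
  apply pvL0
  · intro x hx
    apply pvCats_noUnd
    simp only [List.append_assoc, List.mem_append] at hx
    rcases hx with h | h | h | h | h <;>
      · have h2 := pvPk_sub _ _ _ h
        simp only [List.mem_cons, List.not_mem_nil, or_false] at h2 ⊢
        tauto
  · have hd : ∀ (gi gj : List String), (∀ x ∈ gi, x ∉ gj) →
        List.Disjoint (pvPk gi vals) (pvPk gj vals) := by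
      intro gi gj hgij x hxi hxj
      exact hgij x (pvPk_sub _ _ _ hxi) (pvPk_sub _ _ _ hxj)
    exact pvNodup5 p1 p2 p3 p4 p5
      (pvPk_nodup _ vals) (pvPk_nodup _ vals) (pvPk_nodup _ vals) (pvPk_nodup _ vals) (pvPk_nodup _ vals)
      (hd _ _ (by decide)) (hd _ _ (by decide)) (hd _ _ (by decide)) (hd _ _ (by decide))
      (hd _ _ (by decide)) (hd _ _ (by decide)) (hd _ _ (by decide))
      (hd _ _ (by decide)) (hd _ _ (by decide)) (hd _ _ (by decide))

theorem pvBeq (vals : List String) (h0 : ¬ (vals.length == 0) = true) :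
    vals_string_alt vals = PySem.Str.join "_"
      (pvPk ["U30","30-40","40+"] vals ++ pvPk ["low","avg","high"] vals ++
       pvPk ["U5","5-9","10+"] vals ++ pvPk ["not-rel","rel"] vals ++ pvPk ["none","long","short"] vals) := by
  unfold vals_string_alt
  rw [if_neg h0]
  have hbase : ∀ k, (PySem.Dict.empty : PySem.Dict Int (Int × String)).get? k = pvPick k [] := by
    intro k
    rw [pvPick_nil]
    exact PySem.Dict.get?_empty k
  have H : ∀ k, (vals.foldl pvStepB PySem.Dict.empty).get? k = pvPick k vals := by
    intro k
    simpa using pvFoldInv vals [] PySem.Dict.empty hbase k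
  have hnd : (vals.foldl pvStepB PySem.Dict.empty).keys.Nodup :=
    pvFold_nodup vals PySem.Dict.empty (by simp [PySem.Dict.keys, PySem.Dict.empty])
  show PySem.Str.join "_" ((PySem.List.sorted (vals.foldl pvStepB PySem.Dict.empty).keys (fun k => k) false).map
      (fun g => ((vals.foldl pvStepB PySem.Dict.empty).getD g ((0 : Int), "")).2)) = _
  rw [pvSortedKeys vals _ hnd H]
  unfold pvKeyList
  simp only [List.map_append]
  rw [pvMapPiece _ vals H 0, pvMapPiece _ vals H 1, pvMapPiece _ vals H 2,
      pvMapPiece _ vals H 3, pvMapPiece _ vals H 4,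
      pvPickPk vals 0 (by norm_num), pvPickPk vals 1 (by norm_num), pvPickPk vals 2 (by norm_num),
      pvPickPk vals 3 (by norm_num), pvPickPk vals 4 (by norm_num)]
  rfl

-- ===== VERDICT =====
theorem vals_string_spec : Claim_equal_vals_string := by
  intro vals _ _
  unfold Spec_vals_string
  by_cases h0 : (vals.length == 0) = true
  · simp [vals_string, vals_string_alt, h0]
  · rw [pvAeq vals h0, pvBeq vals h0]
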